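-- pv_equiv track=rewrite | github.com/elikrok/cmmc_tool | enhanced_features/vendor_manager.py | check_boundary_protection
-- ===== SOURCE A (Python) =====
-- from typing import Dict, List, Optional, Tuple
--
-- def check_boundary_protection(config_content: str) -> Dict:
--     """Check boundary protection for EOS."""
--     lines = config_content.lower().split('\n')
--
--     # Check for Management1 interface with ACL
--     mgmt1_present = any('interface management1' in line for line in lines)
--     mgmt_acl = False
--
--     in_mgmt1 = False
--     for line in lines:
--         line = line.strip()
--         if line.startswith('interface management1'):
--             in_mgmt1 = True
--             continue
--         if in_mgmt1 and line.startswith('interface '):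
--             in_mgmt1 = False
--         if in_mgmt1 and 'ip access-group' in line:
--             mgmt_acl = True
--
--     acl_defined = any(line.startswith('ip access-list') for line in lines)
--
--     return {
--         'mgmt_iface_present': mgmt1_present,
--         'mgmt_acl_bound': mgmt_acl,
--         'acls_present_and_applied': acl_defined and mgmt_acl,
--         'passed': mgmt1_present and mgmt_acl and acl_defined
--     }
-- ===== SOURCE B (Python) =====
-- def check_boundary_protection(config_content: str):
--     """Check boundary protection for EOS (block-scan version)."""
--     lines = config_content.lower().split('\n')
--     stripped = [l.strip() for l in lines]
--     n = len(lines)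
--     mgmt1_present = any('interface management1' in l for l in lines)
--     acl_defined = any(l.startswith('ip access-list') for l in lines)
--     mgmt_acl = False
--     i = 0
--     while i < n:
--         if stripped[i].startswith('interface management1'):
--             # consume the block body up to the next interface line
--             j = i + 1
--             while j < n and not stripped[j].startswith('interface '):
--                 if 'ip access-group' in stripped[j]:
--                     mgmt_acl = True
--                 j += 1
--             i = j
--         else:
--             i += 1
--     return {
--         'mgmt_iface_present': mgmt1_present,
--         'mgmt_acl_bound': mgmt_acl,
--         'acls_present_and_applied': acl_defined and mgmt_acl,
--         'passed': mgmt1_present and mgmt_acl and acl_defined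
--     }
-- ===== Notes on version B (the rewrite author's own statement) =====
-- stated objective: alternative
-- what changed: Replaces A's linear state-flag automaton (in_mgmt1 boolean carried across every line) with a two-level block scan: an outer loop that searches for 'interface management1' headers and an inner loop that consumes each block body up to the next interface line, checking for 'ip access-group' there; the two simple presence flags remain one-line any() scans.
import Mathlib
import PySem

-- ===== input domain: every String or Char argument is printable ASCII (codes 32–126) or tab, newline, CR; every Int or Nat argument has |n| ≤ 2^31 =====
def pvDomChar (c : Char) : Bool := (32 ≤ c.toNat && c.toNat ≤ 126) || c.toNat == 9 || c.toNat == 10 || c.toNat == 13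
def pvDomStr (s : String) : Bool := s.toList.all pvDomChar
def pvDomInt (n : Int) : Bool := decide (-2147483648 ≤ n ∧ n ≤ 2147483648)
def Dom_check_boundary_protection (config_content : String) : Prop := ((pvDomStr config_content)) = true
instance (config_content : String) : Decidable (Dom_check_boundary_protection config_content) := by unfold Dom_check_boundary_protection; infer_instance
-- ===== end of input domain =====

-- B replaces A's state-flag loop with a two-level block scan (find header, consume block); return values proved equal.

-- ===== PORT A =====
-- body of A's stateful for-loop; state = (mgmt_acl, in_mgmt1)
def pvStepA (st : Bool × Bool) (line : String) : Bool × Bool :=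
  let line := PySem.Str.strip line
  if PySem.Str.startswith line "interface management1" then (st.1, true)  -- continue
  else
    let in1 := if st.2 && PySem.Str.startswith line "interface " then false else st.2
    let acl := if in1 && PySem.Str.isIn "ip access-group" line then true else st.1
    (acl, in1)

def check_boundary_protection (config_content : String) : List (String × Bool) :=
  -- split? is some because the separator "\n" is nonempty
  let lines := (PySem.Str.split? (PySem.Str.lower config_content) "\n").getD []
  let mgmt1_present := lines.any (fun line => PySem.Str.isIn "interface management1" line)
  let r := lines.foldl pvStepA (false, false)
  let mgmt_acl := r.1
  let acl_defined := lines.any (fun line => PySem.Str.startswith line "ip access-list")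
  [("mgmt_iface_present", mgmt1_present),
   ("mgmt_acl_bound", mgmt_acl),
   ("acls_present_and_applied", acl_defined && mgmt_acl),
   ("passed", mgmt1_present && mgmt_acl && acl_defined)]

-- ===== PORT B =====
-- inner while loop of B: or in 'ip access-group' hits over the block body,
-- return (accumulator, the remaining lines starting at the next 'interface ' line)
def pvScanBlock (t : List String) (acc : Bool) : Bool × List String :=
  match t with
  | [] => (acc, [])
  | s :: rest =>
    if PySem.Str.startswith s "interface " then (acc, s :: rest)
    else pvScanBlock rest (acc || PySem.Str.isIn "ip access-group" s)

-- termination fact for the outer loop: the inner loop never grows the remaining list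
theorem pvScanBlock_len (t : List String) (acc : Bool) : (pvScanBlock t acc).2.length ≤ t.length := by
  induction t generalizing acc with
  | nil => simp [pvScanBlock]
  | cons s rest ih =>
    simp only [pvScanBlock]
    split
    · simp
    · exact le_trans (ih _) (Nat.le_succ _)

-- outer while loop of B: search for 'interface management1' headers, consume each block
def pvScanBlocks (t : List String) (acc : Bool) : Bool :=
  match t with
  | s :: rest =>
    if PySem.Str.startswith s "interface management1" then
      let p := pvScanBlock rest acc
      pvScanBlocks p.2 p.1
    else pvScanBlocks rest acc
  | [] => acc
termination_by t.length
decreasing_by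
  · exact Nat.lt_succ_of_le (pvScanBlock_len rest acc)
  · simp

def check_boundary_protection_alt (config_content : String) : List (String × Bool) :=
  -- split? is some because the separator "\n" is nonempty
  let lines := (PySem.Str.split? (PySem.Str.lower config_content) "\n").getD []
  let stripped := lines.map PySem.Str.strip
  let mgmt1_present := lines.any (fun l => PySem.Str.isIn "interface management1" l)
  let acl_defined := lines.any (fun l => PySem.Str.startswith l "ip access-list")
  let mgmt_acl := pvScanBlocks stripped false
  [("mgmt_iface_present", mgmt1_present),
   ("mgmt_acl_bound", mgmt_acl),
   ("acls_present_and_applied", acl_defined && mgmt_acl),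
   ("passed", mgmt1_present && mgmt_acl && acl_defined)]

-- ===== PRECONDITION & SPEC =====
def Spec_check_boundary_protection (config_content : String) (out : List (String × Bool)) : Prop := out = check_boundary_protection_alt config_content
instance (config_content : String) (out : List (String × Bool)) : Decidable (Spec_check_boundary_protection config_content out) := by unfold Spec_check_boundary_protection; infer_instance

-- ===== CLAIM (what is proved, stated in full; the proofs are below) =====
def Claim_equal_check_boundary_protection : Prop := ∀ (config_content : String), Dom_check_boundary_protection config_content → Spec_check_boundary_protection config_content (check_boundary_protection config_content)

-- ===== LEMMAS AND PROOFS =====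

-- A's loop body on an already-stripped line
def pvStepA' (st : Bool × Bool) (line : String) : Bool × Bool :=
  if PySem.Str.startswith line "interface management1" then (st.1, true)
  else
    let in1 := if st.2 && PySem.Str.startswith line "interface " then false else st.2
    let acl := if in1 && PySem.Str.isIn "ip access-group" line then true else st.1
    (acl, in1)

theorem pvStepA_eq (st : Bool × Bool) (line : String) :
    pvStepA st line = pvStepA' st (PySem.Str.strip line) := rfl

-- a line starting with the management1 header starts with 'interface '
theorem pv_header_iface {s : String}
    (h : PySem.Str.startswith s "interface management1" = true) :
    PySem.Str.startswith s "interface " = true := by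
  simp only [PySem.Str.startswith_eq, PySem.Chars.startswith_iff] at h ⊢
  exact List.IsPrefix.trans (by decide) h

-- invariant: A's fold over stripped lines equals B's block scan, from either in_mgmt1 state
theorem pv_blocks (t : List String) :
    (∀ acc : Bool, (t.foldl pvStepA' (acc, false)).1 = pvScanBlocks t acc)
    ∧ (∀ acc : Bool, (t.foldl pvStepA' (acc, true)).1 =
        pvScanBlocks (pvScanBlock t acc).2 (pvScanBlock t acc).1) := by
  induction t with
  | nil => simp [pvScanBlocks, pvScanBlock]
  | cons s rest ih =>
    obtain ⟨ihf, iht⟩ := ih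
    by_cases h1 : PySem.Str.startswith s "interface management1" = true
    · have h2 := pv_header_iface h1
      constructor <;> intro acc <;>
        simp only [List.foldl_cons, pvStepA', pvScanBlocks, pvScanBlock, h1, h2,
          if_true] <;> exact iht acc
    · by_cases h2 : PySem.Str.startswith s "interface " = true
      · constructor <;> intro acc <;>
          simp only [List.foldl_cons, pvStepA', pvScanBlocks, pvScanBlock, h1, h2,
            Bool.false_and, Bool.true_and, Bool.and_true, if_true, if_false] <;>
          exact ihf acc
      · constructor <;> intro acc
        · simp only [List.foldl_cons, pvStepA', pvScanBlocks, pvScanBlock, h1, h2,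
            Bool.false_and, if_false]
          exact ihf acc
        · simp only [List.foldl_cons, pvStepA', pvScanBlocks, pvScanBlock, h1, h2,
            Bool.true_and, Bool.and_false, if_false]
          cases h3 : PySem.Str.isIn "ip access-group" s <;>
            simp only [h3, if_true, if_false, Bool.or_true, Bool.or_false] <;>
          · have := iht (acc || PySem.Str.isIn "ip access-group" s)
            simp only [h3, Bool.or_true, Bool.or_false] at this
            exact this

-- A's whole fold (stripping inside the step) equals B's scan of the pre-stripped lines
theorem pv_fold_eq_blocks (lines : List String) :
    (lines.foldl pvStepA (false, false)).1
      = pvScanBlocks (lines.map PySem.Str.strip) false := by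
  have h : ∀ (l : List String) (i : Bool × Bool),
      l.foldl pvStepA i = (l.map PySem.Str.strip).foldl pvStepA' i := by
    intro l
    induction l with
    | nil => intro i; simp
    | cons x xs ih =>
      intro i
      rw [List.foldl_cons, List.map_cons, List.foldl_cons, pvStepA_eq]
      exact ih _
  rw [h]
  exact (pv_blocks (lines.map PySem.Str.strip)).1 false

-- ===== VERDICT (by name: the statement is the Claim_ definition above) =====
theorem check_boundary_protection_spec : Claim_equal_check_boundary_protection := by
  intro cc _
  unfold Spec_check_boundary_protection check_boundary_protection check_boundary_protection_alt
  simp only [pv_fold_eq_blocks]
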